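-- pv_equiv track=rewrite | github.com/google/qwix | qwix/core/dot_general.py | _apply_tiling
-- ===== SOURCE A (Python) =====
-- from collections.abc import Collection, Sequence
--
-- def _apply_tiling(
--     contracting_axes: Sequence[int],
--     batch_axes: Sequence[int],
--     tiled_axes: Collection[int],
-- ) -> tuple[tuple[int, ...], tuple[int, ...], tuple[int, ...]]:
--   """Apply tiling to dimension numbers.
--
--   Each tiled contracting axis is split into two axes, the first being the new
--   batch axis, and the second being the new contracting axis.
--
--   Args:
--     contracting_axes: The original contracting axes.
--     batch_axes: The original batch axes.
--     tiled_axes: The tiled axes. Must be a subset of contracting_axes.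
--
--   Returns:
--     A tuple of (new_ca, new_ba, sum_axes).
--   """
--   new_ca = [a + sum(t <= a for t in tiled_axes) for a in contracting_axes]
--   new_ba = [a + sum(t < a for t in tiled_axes) for a in batch_axes]
--   # We choose to insert the tile_count axes to the end of the batch axes.
--   # Alternatively, we could insert them to the beginning or to the middle,
--   # as long as lhs and rhs use the same order.
--   new_ba += [
--       a + sum(t < a for t in tiled_axes)
--       for a in contracting_axes
--       if a in tiled_axes
--   ]
--   sum_axes = range(len(batch_axes), len(new_ba))
--   return tuple(new_ca), tuple(new_ba), tuple(sum_axes)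
-- ===== SOURCE B (Python) =====
-- def _apply_tiling(contracting_axes, batch_axes, tiled_axes):
--   """Sort tiled_axes once; each shift count is a binary search (bisect) instead
--   of a linear scan, and ONE explicit pass over contracting_axes builds both
--   new_ca and the appended tile-count batch axes simultaneously (A makes two
--   separate comprehension passes over contracting_axes).  The bisect helpers
--   are hand-written verbatim CPython bisect_right/bisect_left, since importing
--   bisect is not allowed here."""
--   s = sorted(tiled_axes)
--   ts = set(tiled_axes)
--
--   def _bisect_right(x):
--     lo, hi = 0, len(s)
--     while lo < hi:
--       mid = (lo + hi) // 2
--       if x < s[mid]: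
--         hi = mid
--       else:
--         lo = mid + 1
--     return lo
--
--   def _bisect_left(x):
--     lo, hi = 0, len(s)
--     while lo < hi:
--       mid = (lo + hi) // 2
--       if s[mid] < x:
--         lo = mid + 1
--       else:
--         hi = mid
--     return lo
--
--   new_ca = []
--   tail = []
--   for a in contracting_axes:
--     new_ca.append(a + _bisect_right(a))
--     if a in ts:
--       tail.append(a + _bisect_left(a))
--   new_ba = []
--   for a in batch_axes:
--     new_ba.append(a + _bisect_left(a))
--   new_ba += tail
--   return tuple(new_ca), tuple(new_ba), tuple(range(len(batch_axes), len(new_ba)))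
-- ===== Notes on version B (the rewrite author's own statement) =====
-- stated objective: faster
-- what changed: A scans all of tiled_axes once per axis and makes two separate comprehension passes over contracting_axes; B sorts tiled_axes once, gets each shift by binary search (hand-written bisect_right/bisect_left), and builds new_ca and the appended tile-count batch axes in a single explicit pass over contracting_axes with a set for membership.
import Mathlib
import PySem

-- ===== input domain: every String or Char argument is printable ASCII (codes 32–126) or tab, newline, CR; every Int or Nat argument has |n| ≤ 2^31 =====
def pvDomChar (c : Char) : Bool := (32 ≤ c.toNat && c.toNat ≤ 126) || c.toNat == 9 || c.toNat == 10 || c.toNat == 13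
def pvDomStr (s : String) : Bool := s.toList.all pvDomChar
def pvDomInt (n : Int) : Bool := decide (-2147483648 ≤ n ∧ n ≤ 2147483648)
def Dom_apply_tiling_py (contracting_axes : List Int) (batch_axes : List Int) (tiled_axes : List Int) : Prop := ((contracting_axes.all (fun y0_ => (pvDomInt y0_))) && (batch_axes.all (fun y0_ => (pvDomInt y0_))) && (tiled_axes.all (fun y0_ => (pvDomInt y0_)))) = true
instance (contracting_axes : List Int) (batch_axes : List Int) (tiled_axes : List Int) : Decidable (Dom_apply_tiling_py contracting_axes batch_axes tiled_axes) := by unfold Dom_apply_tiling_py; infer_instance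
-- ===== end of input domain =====

-- B sorts tiled_axes once and replaces A's per-axis linear scans by binary searches,
-- building new_ca and the appended tile-count axes in one pass over contracting_axes; same values.

-- ===== PORT A =====
def apply_tiling_py (contracting_axes : List Int) (batch_axes : List Int) (tiled_axes : List Int) : List Int × List Int × List Int :=
  let new_ca := contracting_axes.map (fun a => a + (tiled_axes.map (fun t => if t ≤ a then (1 : Int) else 0)).sum)
  let new_ba := batch_axes.map (fun a => a + (tiled_axes.map (fun t => if t < a then (1 : Int) else 0)).sum)
      ++ (contracting_axes.filter (fun a => tiled_axes.contains a)).map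
           (fun a => a + (tiled_axes.map (fun t => if t < a then (1 : Int) else 0)).sum)
  (new_ca, new_ba, PySem.List.pyRange (batch_axes.length : Int) (new_ba.length : Int))

-- ===== PORT B =====
-- Source B's hand-written _bisect_right/_bisect_left are verbatim CPython bisect loops,
-- i.e. exactly PySem.List.bisectRight/bisectLeft.  goCA is Source B's single loop over
-- contracting_axes that appends to new_ca and, when a is tiled, to tail; goBA is its
-- loop over batch_axes.
def goCA (s : List Int) (ts : PySem.Set Int) : List Int → List Int × List Int
  | [] => ([], [])
  | a :: rest =>
      let (ca, tl) := goCA s ts rest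
      ((a + (PySem.List.bisectRight s a : Int)) :: ca,
       if ts.contains a then (a + (PySem.List.bisectLeft s a : Int)) :: tl else tl)

def goBA (s : List Int) : List Int → List Int
  | [] => []
  | a :: rest => (a + (PySem.List.bisectLeft s a : Int)) :: goBA s rest

def apply_tiling_py_alt (contracting_axes : List Int) (batch_axes : List Int) (tiled_axes : List Int) : List Int × List Int × List Int :=
  let s := PySem.List.sorted tiled_axes (fun x => x)
  let ts := PySem.Set.ofList tiled_axes
  let (new_ca, tail) := goCA s ts contracting_axes
  let new_ba := goBA s batch_axes ++ tail
  (new_ca, new_ba, PySem.List.pyRange (batch_axes.length : Int) (new_ba.length : Int))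

-- ===== PRECONDITION & SPEC =====
def Spec_apply_tiling_py (contracting_axes : List Int) (batch_axes : List Int) (tiled_axes : List Int) (out : List Int × List Int × List Int) : Prop := out = apply_tiling_py_alt contracting_axes batch_axes tiled_axes
instance (contracting_axes : List Int) (batch_axes : List Int) (tiled_axes : List Int) (out : List Int × List Int × List Int) : Decidable (Spec_apply_tiling_py contracting_axes batch_axes tiled_axes out) := by unfold Spec_apply_tiling_py; infer_instance

-- ===== CLAIM =====
def Claim_equal_apply_tiling_py : Prop := ∀ (contracting_axes : List Int) (batch_axes : List Int) (tiled_axes : List Int), Dom_apply_tiling_py contracting_axes batch_axes tiled_axes → Spec_apply_tiling_py contracting_axes batch_axes tiled_axes (apply_tiling_py contracting_axes batch_axes tiled_axes)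

-- ===== LEMMAS AND PROOFS =====

-- countP of a list that is all-p before index k and all-not-p from k on is k.
theorem countP_eq_of_split (s : List Int) (p : Int → Bool) (k : Nat) (hk : k ≤ s.length)
    (h1 : ∀ (j : Nat) (hj : j < s.length), j < k → p s[j] = true)
    (h2 : ∀ (j : Nat) (hj : j < s.length), k ≤ j → ¬ p s[j] = true) :
    s.countP p = k := by
  have hsplit := List.take_append_drop k s
  have : s.countP p = (s.take k).countP p + (s.drop k).countP p := by
    conv_lhs => rw [← hsplit]
    exact List.countP_append
  rw [this]
  have htake : (s.take k).countP p = (s.take k).length := by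
    rw [List.countP_eq_length]
    intro a ha
    rcases List.mem_iff_getElem.mp ha with ⟨i, hi, rfl⟩
    have hil : i < s.length := by simp [List.length_take] at hi; omega
    rw [List.getElem_take]
    exact h1 i hil (by simp [List.length_take] at hi; omega)
  have hdrop : (s.drop k).countP p = 0 := by
    rw [List.countP_eq_zero]
    intro a ha
    rcases List.mem_iff_getElem.mp ha with ⟨i, hi, rfl⟩
    rw [List.getElem_drop]
    exact h2 (k + i) (by simp at hi; omega) (Nat.le_add_right k i)
  rw [htake, hdrop, List.length_take]
  omega

-- bisect_right on sorted(ta) counts the t ≤ a of ta.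
theorem bisectRight_eq_countP (ta : List Int) (a : Int) :
    PySem.List.bisectRight (PySem.List.sorted ta (fun x => x)) a
      = ta.countP (fun t => t ≤ a) := by
  set s := PySem.List.sorted ta (fun x => x) with hs
  have hpw : s.Pairwise (· ≤ ·) := PySem.List.sorted_pairwise ta (fun x => x)
  obtain ⟨hle, hpre, hsuf⟩ := PySem.List.bisectRight_spec s a hpw
  have hcs : s.countP (fun t => t ≤ a) = PySem.List.bisectRight s a := by
    apply countP_eq_of_split s _ _ hle
    · intro j hj hjk; simpa using hpre j hj hjk
    · intro j hj hjk; simpa using hsuf j hj hjk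
  rw [← hcs]
  exact List.Perm.countP_eq _ (PySem.List.sorted_perm ta (fun x => x) false)

-- bisect_left on sorted(ta) counts the t < a of ta.
theorem bisectLeft_eq_countP (ta : List Int) (a : Int) :
    PySem.List.bisectLeft (PySem.List.sorted ta (fun x => x)) a
      = ta.countP (fun t => t < a) := by
  set s := PySem.List.sorted ta (fun x => x) with hs
  have hpw : s.Pairwise (· ≤ ·) := PySem.List.sorted_pairwise ta (fun x => x)
  obtain ⟨hle, hpre, hsuf⟩ := PySem.List.bisectLeft_spec s a hpw
  have hcs : s.countP (fun t => t < a) = PySem.List.bisectLeft s a := by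
    apply countP_eq_of_split s _ _ hle
    · intro j hj hjk; simpa using hpre j hj hjk
    · intro j hj hjk; simp only [decide_eq_true_eq, not_lt]; exact hsuf j hj hjk
  rw [← hcs]
  exact List.Perm.countP_eq _ (PySem.List.sorted_perm ta (fun x => x) false)

-- per-element: A's linear 0/1-sum equals B's binary search.
theorem sum_le_eq_bisectRight (ta : List Int) (a : Int) :
    (ta.map (fun t => if t ≤ a then (1 : Int) else 0)).sum
      = (PySem.List.bisectRight (PySem.List.sorted ta (fun x => x)) a : Int) := by
  rw [bisectRight_eq_countP]
  simpa using PySem.List.sum_map_ite_one_zero (fun t => decide (t ≤ a)) ta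

theorem sum_lt_eq_bisectLeft (ta : List Int) (a : Int) :
    (ta.map (fun t => if t < a then (1 : Int) else 0)).sum
      = (PySem.List.bisectLeft (PySem.List.sorted ta (fun x => x)) a : Int) := by
  rw [bisectLeft_eq_countP]
  simpa using PySem.List.sum_map_ite_one_zero (fun t => decide (t < a)) ta

-- B's single pass over contracting_axes computes A's two comprehension passes.
theorem goCA_eq (ta : List Int) (ca : List Int) :
    goCA (PySem.List.sorted ta (fun x => x)) (PySem.Set.ofList ta) ca
      = (ca.map (fun a => a + (ta.map (fun t => if t ≤ a then (1 : Int) else 0)).sum),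
         (ca.filter (fun a => ta.contains a)).map
           (fun a => a + (ta.map (fun t => if t < a then (1 : Int) else 0)).sum)) := by
  induction ca with
  | nil => rfl
  | cons a rest ih =>
    have hmem : (PySem.Set.ofList ta).contains a = ta.contains a := by
      simp [PySem.Set.contains]
    simp only [goCA, ih, List.map_cons, List.filter_cons, hmem,
      sum_le_eq_bisectRight, sum_lt_eq_bisectLeft]
    split_ifs <;> simp

theorem goBA_eq (ta : List Int) (ba : List Int) :
    goBA (PySem.List.sorted ta (fun x => x)) ba
      = ba.map (fun a => a + (ta.map (fun t => if t < a then (1 : Int) else 0)).sum) := by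
  induction ba with
  | nil => rfl
  | cons a rest ih => simp only [goBA, ih, List.map_cons, sum_lt_eq_bisectLeft]

-- ===== VERDICT =====
theorem apply_tiling_py_spec : Claim_equal_apply_tiling_py := by
  intro ca ba ta _
  unfold Spec_apply_tiling_py apply_tiling_py apply_tiling_py_alt
  simp only [goCA_eq, goBA_eq]
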